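-- pv_equiv track=rewrite | github.com/coke98/Network_Study | calculate_server/expression.py | is_expression
-- ===== SOURCE A (Python) =====
-- def is_expression(str):
--     # str이 수식이면 True, 아니면 False
--     # 1. str의 길이가 0이면 False
--     if len(str) == 0:
--         return False
--     # 2. str의 첫 글자 혹은 마지막이 연산자이면 False
--     if str[0] in ["+", "-", "*", "/"] or str[-1] in ["+", "-", "*", "/"]:
--         return False
--     # 3. str에 연산자가 1개가 아니라면 False
--     if str.count("+") + str.count("-") + str.count("*") + str.count("/") != 1:
--         return False
--     # 4. str에 숫자가 없으면 False
--     if not any(char.isdigit() for char in str):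
--         return False
--
--     return True
-- ===== SOURCE B (Python) =====
-- def is_expression(str):
--     # Different algorithm: split the string into operator-separated segments,
--     # then judge the shape: valid iff exactly two non-empty segments and a digit somewhere.
--     segs = []
--     cur = ""
--     for ch in str:
--         if ch in "+-*/":
--             segs.append(cur)
--             cur = ""
--         else:
--             cur += ch
--     segs.append(cur)
--     if len(segs) != 2:
--         return False
--     return segs[0] != "" and segs[1] != "" and any(c.isdigit() for c in segs[0] + segs[1])
-- ===== Notes on version B (the rewrite author's own statement) =====
-- stated objective: alternative
-- what changed: Instead of A's four count() scans plus boundary checks and an any() scan, B splits the string into operator-separated segments in one pass and judges the shape: exactly two segments, both non-empty, with a digit somewhere in them.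
import Mathlib
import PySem

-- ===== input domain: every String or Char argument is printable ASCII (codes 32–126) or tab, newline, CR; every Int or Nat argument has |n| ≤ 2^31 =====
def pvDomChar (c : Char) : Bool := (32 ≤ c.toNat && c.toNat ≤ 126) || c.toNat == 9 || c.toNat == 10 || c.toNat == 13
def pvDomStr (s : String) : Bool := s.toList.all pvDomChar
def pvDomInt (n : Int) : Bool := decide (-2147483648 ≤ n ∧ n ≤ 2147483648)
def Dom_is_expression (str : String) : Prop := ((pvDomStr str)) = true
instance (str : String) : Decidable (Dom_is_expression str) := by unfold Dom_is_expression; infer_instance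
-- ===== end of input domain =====

-- B splits the string into operator-separated segments and judges the shape (two non-empty segments with a digit), instead of A's count/boundary/any checks: an alternative algorithm, not faster.


-- ===== PORT A =====
-- 'str[0] in ["+","-","*","/"]' on a character, as A writes it: an explicit disjunction over the four literals
def pvIsOpA (c : Char) : Bool := c == '+' || c == '-' || c == '*' || c == '/'

def is_expression (str : String) : Bool :=
  let cs := str.toList
  -- 1. len(str) == 0
  if cs.length = 0 then false
  -- 2. first or last char is an operator (indices 0 and -1; both in range since cs ≠ [])
  else if ((PySem.List.pyGet? cs 0).map pvIsOpA).getD false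
          || ((PySem.List.pyGet? cs (-1)).map pvIsOpA).getD false then false
  -- 3. str.count("+") + str.count("-") + str.count("*") + str.count("/") != 1
  else if PySem.Chars.count cs ['+'] + PySem.Chars.count cs ['-']
          + PySem.Chars.count cs ['*'] + PySem.Chars.count cs ['/'] ≠ 1 then false
  -- 4. not any(char.isdigit() for char in str)
  else if !(cs.any PySem.Chars.isdigit) then false
  else true

-- ===== PORT B =====
-- 'ch in "+-*/"' as B writes it: membership in the string's characters
def pvIsOpB (c : Char) : Bool := "+-*/".toList.contains c

def is_expression_alt (str : String) : Bool :=
  let cs := str.toList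
  -- one pass: split into operator-separated segments (segs = finished segments, cur = current one)
  let st := cs.foldl (fun (st : List (List Char) × List Char) ch =>
      if pvIsOpB ch then (st.1 ++ [st.2], []) else (st.1, st.2 ++ [ch])) ([], [])
  let segs := st.1 ++ [st.2]
  -- shape check: exactly two non-empty segments with a digit somewhere
  if segs.length ≠ 2 then false
  else
    let a := segs.getD 0 []
    let b := segs.getD 1 []
    !a.isEmpty && !b.isEmpty && (a ++ b).any PySem.Chars.isdigit

-- ===== PRECONDITION & SPEC =====
def Spec_is_expression (str : String) (out : Bool) : Prop := out = is_expression_alt str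
instance (str : String) (out : Bool) : Decidable (Spec_is_expression str out) := by unfold Spec_is_expression; infer_instance

-- ===== CLAIM (what is proved, stated in full; the proofs are below) =====
def Claim_equal_is_expression : Prop := ∀ (str : String), Dom_is_expression str → Spec_is_expression str (is_expression str)

-- ===== LEMMAS AND PROOFS =====

-- pure recursive description of B's fold
def pvSplit (cur : List Char) : List Char → List (List Char) × List Char
  | [] => ([], cur)
  | c :: t =>
    if pvIsOpB c then
      let r := pvSplit [] t
      (cur :: r.1, r.2)
    else pvSplit (cur ++ [c]) t

lemma fold_split : ∀ (l : List Char) (segs : List (List Char)) (cur : List Char),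
    l.foldl (fun (st : List (List Char) × List Char) ch =>
      if pvIsOpB ch then (st.1 ++ [st.2], []) else (st.1, st.2 ++ [ch])) (segs, cur)
    = (segs ++ (pvSplit cur l).1, (pvSplit cur l).2) := by
  intro l
  induction l with
  | nil => intro segs cur; simp [pvSplit]
  | cons c t ih =>
    intro segs cur
    by_cases hc : pvIsOpB c = true
    · simp [pvSplit, hc, ih]
    · simp [pvSplit, hc, ih]

lemma split_len (l : List Char) : ∀ cur, ((pvSplit cur l).1).length = l.countP pvIsOpB := by
  induction l with
  | nil => intro cur; simp [pvSplit]
  | cons c t ih =>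
    intro cur
    by_cases hc : pvIsOpB c = true <;> simp [pvSplit, hc, ih]

lemma split_nop (l : List Char) : ∀ cur, l.countP pvIsOpB = 0 → pvSplit cur l = ([], cur ++ l) := by
  induction l with
  | nil => intro cur _; simp [pvSplit]
  | cons c t ih =>
    intro cur h
    rw [List.countP_cons] at h
    have hc : pvIsOpB c = false := by by_cases hx : pvIsOpB c = true <;> simp [hx] at h ⊢
    simp [pvSplit, hc, ih (cur ++ [c]) (by omega)]

lemma split_one (u : List Char) : ∀ (cur : List Char) (o : Char) (v : List Char),
    u.countP pvIsOpB = 0 → pvIsOpB o = true → v.countP pvIsOpB = 0 →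
    pvSplit cur (u ++ o :: v) = ([cur ++ u], v) := by
  induction u with
  | nil =>
    intro cur o v _ ho hv
    simp [pvSplit, ho, split_nop v [] hv]
  | cons c t ih =>
    intro cur o v hu ho hv
    rw [List.countP_cons] at hu
    have hc : pvIsOpB c = false := by by_cases hx : pvIsOpB c = true <;> simp [hx] at hu ⊢
    rw [hc] at hu; simp only [Bool.false_eq_true, if_false, Nat.add_zero] at hu
    simp [pvSplit, hc, ih (cur ++ [c]) o v hu ho hv]

lemma decomp_one (cs : List Char) (h : cs.countP pvIsOpB = 1) :
    ∃ u o v, cs = u ++ o :: v ∧ pvIsOpB o = true ∧ u.countP pvIsOpB = 0 ∧ v.countP pvIsOpB = 0 := by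
  induction cs with
  | nil => simp at h
  | cons c t ih =>
    rw [List.countP_cons] at h
    by_cases hc : pvIsOpB c = true
    · refine ⟨[], c, t, by simp, hc, by simp, ?_⟩
      simp only [hc, if_true] at h
      omega
    · obtain ⟨u, o, v, heq, ho, hu, hv⟩ := ih
        (by simp only [hc, Bool.false_eq_true, if_false] at h; omega)
      exact ⟨c :: u, o, v, by simp [heq], ho, by simp [hc, hu], hv⟩

-- Chars.count with a single-character needle is List.count
lemma count_go_single (c : Char) : ∀ (l : List Char) (fuel acc : Nat), l.length ≤ fuel →
    PySem.Chars.count.go [c] fuel l acc = acc + l.count c := by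
  intro l
  induction l with
  | nil => intro fuel acc _; cases fuel <;> simp [PySem.Chars.count.go]
  | cons h t ih =>
    intro fuel acc hle
    cases fuel with
    | zero => simp at hle
    | succ n =>
      simp only [List.length_cons, Nat.succ_le_succ_iff] at hle
      simp only [PySem.Chars.count.go, List.isPrefixOf]
      by_cases hc : c = h
      · subst hc
        rw [if_pos (by simp)]
        simp only [List.length_cons, List.length_nil, List.drop_succ_cons, List.drop_zero]
        rw [ih n (acc + 1) hle, List.count_cons_self]
        omega
      · have hbeq : (c == h) = false := by simp [hc]
        simp only [hbeq, Bool.false_and, if_neg Bool.false_ne_true]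
        rw [ih n acc hle]
        simp [Ne.symm hc]

lemma count_single (cs : List Char) (c : Char) :
    PySem.Chars.count cs [c] = cs.count c := by
  simp [PySem.Chars.count, count_go_single c cs cs.length 0 le_rfl]

-- the two operator tests agree
lemma isOp_eq : pvIsOpB = pvIsOpA := by
  funext c
  simp only [pvIsOpB, pvIsOpA]
  have hl : "+-*/".toList = ['+', '-', '*', '/'] := rfl
  rw [hl]
  simp [Bool.beq_eq_decide_eq, Bool.or_assoc]

-- the four counts sum to the operator countP
lemma countP_ops (cs : List Char) :
    cs.countP pvIsOpA = cs.count '+' + cs.count '-' + cs.count '*' + cs.count '/' := by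
  induction cs with
  | nil => simp
  | cons h t ih =>
    simp only [List.countP_cons, List.count_cons, ih, pvIsOpA]
    by_cases h1 : h = '+' <;> by_cases h2 : h = '-' <;> by_cases h3 : h = '*' <;>
      by_cases h4 : h = '/' <;> subst_vars <;> simp_all <;> omega

lemma op_not_digit (c : Char) (h : pvIsOpB c = true) : PySem.Chars.isdigit c = false := by
  have : c = '+' ∨ c = '-' ∨ c = '*' ∨ c = '/' := by
    have hl : "+-*/".toList = ['+', '-', '*', '/'] := rfl
    simpa [pvIsOpB, hl] using h
  rcases this with rfl | rfl | rfl | rfl <;> decide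

lemma pyGet_zero (h : Char) (t : List Char) : PySem.List.pyGet? (h :: t) 0 = some h := by
  simp [PySem.List.pyGet?, PySem.List.pyIdx?]

lemma pyGet_neg_one (h : Char) (t : List Char) :
    PySem.List.pyGet? (h :: t) (-1) = some ((h :: t).getLast (by simp)) := by
  simp [PySem.List.pyGet?, PySem.List.pyIdx?, List.getLast_eq_getElem]
  exact List.getElem_of_eq rfl (by simp)

-- ===== VERDICT (by name: the statement is the Claim_ definition above) =====
theorem is_expression_spec : Claim_equal_is_expression := by
  intro s _
  unfold Spec_is_expression is_expression is_expression_alt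
  cases hcs : s.toList with
  | nil => simp
  | cons h t =>
    simp only [fold_split, List.nil_append]
    by_cases hk : (h :: t).countP pvIsOpB = 1
    · obtain ⟨u, o, v, heq, ho, hu, hv⟩ := decomp_one _ hk
      rw [heq, split_one u [] o v hu ho hv]
      have hcnt : PySem.Chars.count (u ++ o :: v) ['+'] + PySem.Chars.count (u ++ o :: v) ['-']
          + PySem.Chars.count (u ++ o :: v) ['*'] + PySem.Chars.count (u ++ o :: v) ['/'] = 1 := by
        simp only [count_single]
        rw [← countP_ops, ← isOp_eq, ← heq, hk]
      cases u with
      | nil =>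
        -- first char is the operator: both sides false
        simp [isOp_eq ▸ ho]
      | cons hu1 tu =>
        have hufirst : pvIsOpA hu1 = false := by
          have hx := List.countP_eq_zero.mp hu hu1 (by simp)
          rw [isOp_eq] at hx; simpa using hx
        cases v with
        | nil =>
          -- last char is the operator: both sides false
          simp only [List.cons_append]
          rw [if_neg (by simp), pyGet_zero, pyGet_neg_one]
          have hlast : (hu1 :: (tu ++ [o])).getLast (by simp) = o := by
            rw [List.getLast_cons (by simp)]
            exact List.getLast_append_singleton tu
          simp [hlast, isOp_eq ▸ ho]
        | cons hv1 tv =>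
          simp only [List.cons_append]
          rw [if_neg (by simp), pyGet_zero, pyGet_neg_one]
          have hvlast : pvIsOpA ((hu1 :: (tu ++ o :: hv1 :: tv)).getLast (by simp)) = false := by
            rw [List.getLast_cons (by simp),
              List.getLast_append_of_ne_nil _ (List.cons_ne_nil _ _),
              List.getLast_cons (List.cons_ne_nil _ _)]
            have hx := List.countP_eq_zero.mp hv ((hv1 :: tv).getLast (by simp)) (List.getLast_mem _)
            rw [isOp_eq] at hx; simpa using hx
          have hcnt' : PySem.Chars.count (hu1 :: (tu ++ o :: hv1 :: tv)) ['+']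
              + PySem.Chars.count (hu1 :: (tu ++ o :: hv1 :: tv)) ['-']
              + PySem.Chars.count (hu1 :: (tu ++ o :: hv1 :: tv)) ['*']
              + PySem.Chars.count (hu1 :: (tu ++ o :: hv1 :: tv)) ['/'] = 1 := by
            simpa using hcnt
          simp only [Option.map_some, Option.getD_some, hufirst, hvlast, Bool.or_self]
          rw [if_neg (by simp), if_neg (by simp [hcnt'])]
          have hdig : ((hu1 :: (tu ++ o :: hv1 :: tv)).any PySem.Chars.isdigit)
              = (((hu1 :: tu) ++ hv1 :: tv).any PySem.Chars.isdigit) := by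
            simp only [List.any_cons, List.any_append, op_not_digit o ho, Bool.false_or, Bool.or_assoc]
          simp only [hdig, List.nil_append]
          rw [if_neg (show ¬(((hu1 :: tu) :: [hv1 :: tv]).length ≠ 2) by simp)]
          simp only [List.getD, List.getElem?_cons_zero, List.getElem?_cons_succ,
            Option.getD_some, List.isEmpty_cons, Bool.not_false, Bool.true_and]
          cases hval : ((hu1 :: tu) ++ hv1 :: tv).any PySem.Chars.isdigit <;>
            simp only [Bool.not_false, Bool.not_true] <;> rfl
    · -- operator count ≠ 1: both sides false
      have hlen : ((pvSplit [] (h :: t)).1 ++ [(pvSplit [] (h :: t)).2]).length ≠ 2 := by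
        simp [split_len, hk]
      rw [if_pos hlen]
      have hcnt : PySem.Chars.count (h :: t) ['+'] + PySem.Chars.count (h :: t) ['-']
          + PySem.Chars.count (h :: t) ['*'] + PySem.Chars.count (h :: t) ['/'] ≠ 1 := by
        simp only [count_single]
        rw [← countP_ops, ← isOp_eq]; exact hk
      split_ifs <;> simp_all
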